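-- pv_equiv track=rewrite | github.com/lflanagan17/CCSGA | general.py | char_position
-- ===== SOURCE A (Python) =====
-- import string
--
-- def char_position(letter):
--     if len(letter) == 1:
--         return string.ascii_lowercase.index(letter.lower())
--     else:
--         v = 0
--         for l in letter[:-1]:
--             v = v + char_position(l) + 1  * 25
--         v += char_position(letter[-1])
--         return v
-- ===== SOURCE B (Python) =====
-- import string
--
--
-- def char_position(letter):
--     # Closed form: A's recursion adds 25 once per character except the last,
--     # and each character contributes its alphabet index.
--     return 25 * (len(letter) - 1) + sum(string.ascii_lowercase.index(c.lower()) for c in letter)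
-- ===== Notes on version B (the rewrite author's own statement) =====
-- stated objective: simpler
-- what changed: Replaced A's self-recursion plus per-character loop with a single closed-form expression: 25*(len-1) plus the sum of each character's alphabet index; no recursion and no branch remain.
import Mathlib
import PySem

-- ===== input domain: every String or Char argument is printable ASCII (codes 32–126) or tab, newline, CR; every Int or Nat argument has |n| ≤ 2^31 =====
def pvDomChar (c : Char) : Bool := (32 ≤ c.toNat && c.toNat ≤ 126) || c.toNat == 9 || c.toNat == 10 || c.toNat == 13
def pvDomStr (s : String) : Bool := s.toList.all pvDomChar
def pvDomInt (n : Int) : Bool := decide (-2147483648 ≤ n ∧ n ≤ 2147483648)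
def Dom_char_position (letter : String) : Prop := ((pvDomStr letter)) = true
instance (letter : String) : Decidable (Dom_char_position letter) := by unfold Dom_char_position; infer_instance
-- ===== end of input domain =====

-- B replaces A's recursion+loop with one closed-form sum (objective: simpler).

-- ===== PORT A =====
def pvAscii : List Char := "abcdefghijklmnopqrstuvwxyz".toList

-- Literal transliteration of A's recursion, on the character list of the string.
-- string.ascii_lowercase.index(x.lower()) for a 1-char x is the list index of the
-- lowered char (ValueError → none; defaulted to 0, excluded by Pre_); letter[-1]
-- on "" is an IndexError → none branch (excluded by Pre_).
def cpA (cs : List Char) : Int :=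
  if cs.length = 1 then
    match PySem.List.index? pvAscii ((PySem.Chars.lower cs).headD ' ') with
    | some k => (k : Int)
    | none => 0
  else
    let v := (PySem.List.slice cs none (some (-1))).attach.foldl
      (fun v l => v + cpA [l.1] + 1 * 25) 0
    match hlast : PySem.List.pyGet? cs (-1) with
    | some c => v + cpA [c]
    | none => v
termination_by cs.length
decreasing_by
  · have hm := PySem.List.mem_of_mem_slice cs none (some (-1)) l.2
    have hne : cs ≠ [] := by intro h; subst h; simp at hm
    have : 1 ≤ cs.length := List.length_pos_of_ne_nil hne
    simp only [List.length_singleton]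
    omega
  · have hm := PySem.List.mem_of_pyGet?_eq_some cs hlast
    have hne : cs ≠ [] := by intro h; subst h; simp at hm
    have : 1 ≤ cs.length := List.length_pos_of_ne_nil hne
    simp only [List.length_singleton]
    omega

def char_position (letter : String) : Int := cpA letter.toList

-- ===== PORT B =====
-- string.ascii_lowercase.index(c.lower()) for a char c (ValueError → 0, excluded by Pre_)
def lowerIdx (c : Char) : Int :=
  match PySem.List.index? pvAscii ((PySem.Chars.lower [c]).headD ' ') with
  | some k => (k : Int)
  | none => 0

def char_position_alt (letter : String) : Int :=
  25 * ((letter.toList.length : Int) - 1) + (letter.toList.map lowerIdx).sum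

-- ===== PRECONDITION & SPEC =====
-- Pre_ excludes exactly the inputs where A raises: the empty string (IndexError on letter[-1])
-- and strings with a non-ASCII-letter character (ValueError from .index).
def Pre_char_position (letter : String) : Prop :=
  letter.toList ≠ [] ∧
    letter.toList.all (fun c => ('a' ≤ c && c ≤ 'z') || ('A' ≤ c && c ≤ 'Z')) = true
instance (letter : String) : Decidable (Pre_char_position letter) := by
  unfold Pre_char_position; infer_instance

def pvWitness_char_position : String := "Ab"

def Spec_char_position (letter : String) (out : Int) : Prop := out = char_position_alt letter
instance (letter : String) (out : Int) : Decidable (Spec_char_position letter out) := by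
  unfold Spec_char_position; infer_instance

-- ===== CLAIM (what is proved, stated in full; the proofs are below) =====
def Claim_equal_char_position : Prop := ∀ (letter : String), Dom_char_position letter → Pre_char_position letter → Spec_char_position letter (char_position letter)

-- ===== LEMMAS AND PROOFS =====
theorem cpA_singleton (c : Char) : cpA [c] = lowerIdx c := by
  rw [cpA]
  simp [lowerIdx]

theorem cpA_foldl (xs : List Char) (a : Int) :
    xs.foldl (fun v l => v + cpA [l] + 1 * 25) a
      = a + (xs.map lowerIdx).sum + 25 * xs.length := by
  induction xs generalizing a with
  | nil => simp
  | cons x xs ih =>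
    rw [List.foldl_cons, ih]
    simp only [cpA_singleton, List.map_cons, List.sum_cons, List.length_cons]
    push_cast
    ring

theorem cpA_eq (cs : List Char) (h : cs ≠ []) :
    cpA cs = 25 * ((cs.length : Int) - 1) + (cs.map lowerIdx).sum := by
  by_cases h1 : cs.length = 1
  · obtain ⟨c, rfl⟩ : ∃ c, cs = [c] := by
      match cs, h1 with | [c], _ => exact ⟨c, rfl⟩
    simp [cpA_singleton]
  · rw [cpA, if_neg h1]
    have hlast : PySem.List.pyGet? cs (-1) = some (cs.getLast h) := by
      rw [PySem.List.pyGet?_neg_one, List.getLast?_eq_getLast_of_ne_nil h]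
    rw [hlast]
    dsimp only
    rw [List.foldl_attach (f := fun v l => v + cpA [l] + 1 * 25), PySem.List.slice_to_neg_one, cpA_foldl, cpA_singleton]
    have hsplit : cs = cs.dropLast ++ [cs.getLast h] := (List.dropLast_append_getLast h).symm
    calc 0 + (cs.dropLast.map lowerIdx).sum + 25 * ↑cs.dropLast.length + lowerIdx (cs.getLast h)
        = 25 * ((cs.dropLast.length : Int) + 1 - 1)
            + ((cs.dropLast.map lowerIdx).sum + lowerIdx (cs.getLast h)) := by ring
      _ = 25 * ((cs.length : Int) - 1) + (cs.map lowerIdx).sum := by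
          have hlen : 1 ≤ cs.length := List.length_pos_of_ne_nil h
          conv_rhs => rw [hsplit]
          simp only [List.map_append, List.sum_append, List.map_cons, List.map_nil,
            List.sum_cons, List.sum_nil, List.length_dropLast]
          have : ((cs.length - 1 : Nat) : Int) = (cs.length : Int) - 1 := by omega
          rw [this]
          have h2 : (((cs.length - 1) + 1 : Nat) : Int) = (cs.length : Int) := by omega
          simp only [List.length_append, List.length_singleton, List.length_dropLast, h2]
          ring

-- ===== VERDICT (by name: the statement is the Claim_ definition above) =====
theorem char_position_spec : Claim_equal_char_position := by
  intro letter _ hpre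
  unfold Spec_char_position char_position char_position_alt
  exact cpA_eq letter.toList hpre.1
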